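-- pv_equiv track=rewrite | github.com/jennak04/Unit-3-Functions | Lesson2-Collection-Essential/Part2-strings/homework.py | count_character_types
-- ===== SOURCE A (Python) =====
-- def count_character_types(text):
--     letter_count = 0
--     digit_count = 0
--     space_count = 0
--
--     for char in text:
--         if "A" <= char <= "Z" or "a" <= char <= "z":
--             letter_count += 1
--
--         elif char.isdigit():
--             digit_count += 1
--
--         elif char == " ":
--             space_count += 1
--
--     return f"letters: {letter_count}, digits: {digit_count}, spaces: {space_count}"
-- ===== SOURCE B (Python) =====
-- def count_character_types(text):
--     letters = sum(1 for c in text if "A" <= c <= "Z" or "a" <= c <= "z")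
--     digits = sum(1 for c in text if c.isdigit())
--     spaces = sum(1 for c in text if c == " ")
--     return f"letters: {letters}, digits: {digits}, spaces: {spaces}"
-- ===== Notes on version B (the rewrite author's own statement) =====
-- stated objective: alternative
-- what changed: Replaces the single branch-dispatched loop over three coupled counters with three independent filter-and-sum passes, one per category (valid because the letter/digit/space predicates are pairwise disjoint).
import Mathlib
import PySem

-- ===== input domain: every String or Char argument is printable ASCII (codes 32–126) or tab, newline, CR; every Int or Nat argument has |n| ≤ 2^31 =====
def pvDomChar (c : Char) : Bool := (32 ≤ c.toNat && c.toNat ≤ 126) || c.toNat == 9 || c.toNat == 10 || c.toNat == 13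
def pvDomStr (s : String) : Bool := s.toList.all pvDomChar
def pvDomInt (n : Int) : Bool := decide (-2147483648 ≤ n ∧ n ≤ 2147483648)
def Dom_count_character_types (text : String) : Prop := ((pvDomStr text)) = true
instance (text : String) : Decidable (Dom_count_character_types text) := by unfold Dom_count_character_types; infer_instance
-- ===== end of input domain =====

-- B replaces A's single branch-dispatched loop (three coupled counters, elif chain)
-- with three independent filter-and-sum passes, one per character category.


-- ===== PORT A =====
-- "A" <= char <= "Z" on a one-char Python string is a code-point comparison: Char ≤.
def count_character_types (text : String) : String :=
  let r := text.toList.foldl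
    (fun (st : Int × Int × Int) ch =>
      if ('A' ≤ ch && ch ≤ 'Z') || ('a' ≤ ch && ch ≤ 'z') then (st.1 + 1, st.2.1, st.2.2)
      else if PySem.Chars.isdigit ch then (st.1, st.2.1 + 1, st.2.2)
      else if ch == ' ' then (st.1, st.2.1, st.2.2 + 1)
      else st)
    (0, 0, 0)
  "letters: " ++ PySem.Int.toStr r.1 ++ ", digits: " ++ PySem.Int.toStr r.2.1 ++
    ", spaces: " ++ PySem.Int.toStr r.2.2

-- ===== PORT B =====
-- each 'sum(1 for c in text if p(c))' is a filter followed by a sum of ones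
def count_character_types_alt (text : String) : String :=
  let letters := ((text.toList.filter (fun c => ('A' ≤ c && c ≤ 'Z') || ('a' ≤ c && c ≤ 'z'))).map (fun _ => (1 : Int))).sum
  let digits := ((text.toList.filter (fun c => PySem.Chars.isdigit c)).map (fun _ => (1 : Int))).sum
  let spaces := ((text.toList.filter (fun c => c == ' ')).map (fun _ => (1 : Int))).sum
  "letters: " ++ PySem.Int.toStr letters ++ ", digits: " ++ PySem.Int.toStr digits ++
    ", spaces: " ++ PySem.Int.toStr spaces

-- ===== PRECONDITION & SPEC =====
def Spec_count_character_types (text : String) (out : String) : Prop := out = count_character_types_alt text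
instance (text : String) (out : String) : Decidable (Spec_count_character_types text out) := by unfold Spec_count_character_types; infer_instance

-- ===== CLAIM (what is proved, stated in full; the proofs are below) =====
def Claim_equal_count_character_types : Prop := ∀ (text : String), Dom_count_character_types text → Spec_count_character_types text (count_character_types text)

-- ===== LEMMAS AND PROOFS =====

-- the three category predicates are pairwise disjoint (for every Char)
lemma pv_digit_not_letter (c : Char) (h : PySem.Chars.isdigit c = true) :
    (('A' ≤ c && c ≤ 'Z') || ('a' ≤ c && c ≤ 'z')) = false := by
  simp only [PySem.Chars.isdigit, Bool.and_eq_true, decide_eq_true_eq] at h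
  simp only [Bool.or_eq_false_iff, Bool.and_eq_false_iff, decide_eq_false_iff_not]
  constructor
  · by_cases hA : 'A' ≤ c
    · exact Or.inr (fun hZ => absurd (le_trans hA h.2) (by decide))
    · exact Or.inl hA
  · by_cases ha : 'a' ≤ c
    · exact Or.inr (fun hz => absurd (le_trans ha h.2) (by decide))
    · exact Or.inl ha

lemma pv_space_not_letter (c : Char) (h : c = ' ') :
    (('A' ≤ c && c ≤ 'Z') || ('a' ≤ c && c ≤ 'z')) = false := by
  subst h; decide

lemma pv_space_not_digit (c : Char) (h : c = ' ') : PySem.Chars.isdigit c = false := by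
  subst h; decide

-- A's single loop computes the three independent counts
lemma pv_foldA (l : List Char) (a b c : Int) :
    l.foldl
      (fun (st : Int × Int × Int) ch =>
        if ('A' ≤ ch && ch ≤ 'Z') || ('a' ≤ ch && ch ≤ 'z') then (st.1 + 1, st.2.1, st.2.2)
        else if PySem.Chars.isdigit ch then (st.1, st.2.1 + 1, st.2.2)
        else if ch == ' ' then (st.1, st.2.1, st.2.2 + 1)
        else st)
      (a, b, c)
    = (a + (l.countP (fun ch => ('A' ≤ ch && ch ≤ 'Z') || ('a' ≤ ch && ch ≤ 'z')) : Int),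
       b + (l.countP (fun ch => PySem.Chars.isdigit ch) : Int),
       c + (l.countP (fun ch => ch == ' ') : Int)) := by
  induction l generalizing a b c with
  | nil => simp
  | cons hd tl ih =>
    rw [List.foldl_cons]
    by_cases hl : (('A' ≤ hd && hd ≤ 'Z') || ('a' ≤ hd && hd ≤ 'z')) = true
    · have hd1 : PySem.Chars.isdigit hd = false := by
        by_contra h
        simp only [Bool.not_eq_false] at h
        simp [pv_digit_not_letter hd h] at hl
      have hs1 : (hd == ' ') = false := by
        by_contra h
        simp only [Bool.not_eq_false, beq_iff_eq] at h
        simp [pv_space_not_letter hd h] at hl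
      simp only [hl, if_true]
      rw [ih]
      simp only [List.countP_cons, hl, hd1, hs1]
      simp
      omega
    · simp only [Bool.not_eq_true] at hl
      simp only [hl, Bool.false_eq_true, if_false]
      by_cases hdg : PySem.Chars.isdigit hd = true
      · have hs1 : (hd == ' ') = false := by
          by_contra h
          simp only [Bool.not_eq_false, beq_iff_eq] at h
          simp [pv_space_not_digit hd h] at hdg
        simp only [hdg, if_true]
        rw [ih]
        simp only [List.countP_cons, hl, hdg, hs1]
        simp
        omega
      · simp only [Bool.not_eq_true] at hdg
        simp only [hdg, Bool.false_eq_true, if_false]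
        by_cases hsp : (hd == ' ') = true
        · simp only [hsp, if_true]
          rw [ih]
          simp only [List.countP_cons, hl, hdg, hsp]
          simp
          omega
        · simp only [Bool.not_eq_true] at hsp
          simp only [hsp, Bool.false_eq_true, if_false]
          rw [ih]
          simp only [List.countP_cons, hl, hdg, hsp]
          simp

-- a filter-then-sum-of-ones is a countP
lemma pv_sum_ones (l : List Char) (p : Char → Bool) :
    ((l.filter p).map (fun _ => (1 : Int))).sum = (l.countP p : Int) := by
  rw [List.map_const', List.sum_replicate, List.countP_eq_length_filter]
  simp

-- ===== VERDICT (by name: the statement is the Claim_ definition above) =====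
theorem count_character_types_spec : Claim_equal_count_character_types := by
  intro text _
  unfold Spec_count_character_types count_character_types count_character_types_alt
  rw [pv_foldA, pv_sum_ones, pv_sum_ones, pv_sum_ones]
  simp
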